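-- pv_equiv track=rewrite | github.com/AEPP294/Programas_Python | producto_mas_barato.py | producto_mas_barato
-- ===== SOURCE A (Python) =====
-- def producto_mas_barato(catalogo: dict) -> str:
--     # Verificar si el catálogo está vacío
--     if not catalogo:
--         return "No hay productos para escoger"
--
--     # Encontrar el precio mínimo en el catálogo
--     precio_minimo = float('inf')
--     for producto, precio in catalogo.items():
--         if precio < precio_minimo:
--             precio_minimo = precio
--
--     # Encontrar el nombre del artículo más barato
--     articulo_mas_barato = None
--     for producto, precio in catalogo.items():
--         if precio == precio_minimo:
--             if articulo_mas_barato is None or producto.lower() < articulo_mas_barato.lower():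
--                 articulo_mas_barato = producto
--
--     # Verificar si el artículo más barato vale menos de 10.000 pesos
--     if precio_minimo <= 10000:
--         return articulo_mas_barato
--     else:
--         return None
-- ===== SOURCE B (Python) =====
-- def producto_mas_barato(catalogo: dict) -> str:
--     if not catalogo:
--         return "No hay productos para escoger"
--     nombre, precio = min(catalogo.items(), key=lambda kv: (kv[1], kv[0].lower()))
--     return nombre if precio <= 10000 else None
-- ===== Notes on version B (the rewrite author's own statement) =====
-- stated objective: simpler
-- what changed: Replaced A's two explicit scans (min price, then lex-min lowercased name among min-price items) by a single stable min over the items with the tuple key (price, name.lower()).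
import Mathlib
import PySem

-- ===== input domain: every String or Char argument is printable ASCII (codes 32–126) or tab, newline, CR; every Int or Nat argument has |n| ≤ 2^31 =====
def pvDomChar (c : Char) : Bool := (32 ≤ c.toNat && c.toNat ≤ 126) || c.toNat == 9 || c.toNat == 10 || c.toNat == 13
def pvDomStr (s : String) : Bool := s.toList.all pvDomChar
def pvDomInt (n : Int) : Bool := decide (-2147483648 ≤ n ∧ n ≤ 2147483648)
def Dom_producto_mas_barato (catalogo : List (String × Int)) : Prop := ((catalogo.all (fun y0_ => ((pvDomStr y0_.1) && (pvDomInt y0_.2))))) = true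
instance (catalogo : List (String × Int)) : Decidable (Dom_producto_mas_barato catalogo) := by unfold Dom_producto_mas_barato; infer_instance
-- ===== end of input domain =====

-- B replaces A's two explicit scans by a single stable min over the items with tuple key (price, lowercased name): simpler, same cost.

-- ===== PORT A =====
-- first loop's body: running-minimum price; 'none' plays float('inf') (every Int is below it)
def pmStep (pm : Option Int) (kv : String × Int) : Option Int :=
  match pm with
  | none => some kv.2
  | some m => if kv.2 < m then some kv.2 else some m

-- second loop's body: lex-smallest lowercased name among items whose price equals pm ('None' = none)
def artStep (pm : Option Int) (art : Option String) (kv : String × Int) : Option String :=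
  if some kv.2 = pm then
    match art with
    | none => some kv.1
    | some a => if PySem.Str.lower kv.1 < PySem.Str.lower a then some kv.1 else some a
  else art

def producto_mas_barato (catalogo : List (String × Int)) : Option String :=
  if catalogo.isEmpty then some "No hay productos para escoger"
  else
    let pm := catalogo.foldl pmStep none
    let art := catalogo.foldl (artStep pm) none
    match pm with
    | some m => if m ≤ 10000 then art else none
    | none => none   -- unreachable: catalogo is nonempty, so pm = some _

-- ===== PORT B =====
def producto_mas_barato_alt (catalogo : List (String × Int)) : Option String :=
  match catalogo with
  | [] => some "No hay productos para escoger"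
  | _ :: _ =>
    -- min(catalogo.items(), key=lambda kv: (kv[1], kv[0].lower()))
    match PySem.List.min2? catalogo (fun kv => kv.2) (fun kv => PySem.Str.lower kv.1) with
    | some (nombre, precio) => if precio ≤ 10000 then some nombre else none
    | none => none   -- unreachable: the list is nonempty

-- ===== PRECONDITION & SPEC =====
def Spec_producto_mas_barato (catalogo : List (String × Int)) (out : Option String) : Prop := out = producto_mas_barato_alt catalogo
instance (catalogo : List (String × Int)) (out : Option String) : Decidable (Spec_producto_mas_barato catalogo out) := by unfold Spec_producto_mas_barato; infer_instance

-- ===== CLAIM (what is proved, stated in full; the proofs are below) =====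
def Claim_equal_producto_mas_barato : Prop := ∀ (catalogo : List (String × Int)), Dom_producto_mas_barato catalogo → Spec_producto_mas_barato catalogo (producto_mas_barato catalogo)

-- ===== LEMMAS AND PROOFS =====

-- one step of B's min2? fold, on the bare pair
def bstep (b kv : String × Int) : String × Int :=
  if (decide (kv.2 < b.2) || !decide (b.2 < kv.2) && decide (PySem.Str.lower kv.1 < PySem.Str.lower b.1)) then kv else b

-- the running best of B's min2? fold, written recursively
def bestF (t : List (String × Int)) (b : String × Int) : String × Int :=
  match t with
  | [] => b
  | kv :: t' => bestF t' (bstep b kv)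

lemma bstep_price (b kv : String × Int) : (bstep b kv).2 = if kv.2 < b.2 then kv.2 else b.2 := by
  unfold bstep
  split_ifs with h1 h2 h2 <;> try rfl
  · simp only [Bool.or_eq_true, Bool.and_eq_true, Bool.not_eq_true', decide_eq_false_iff_not,
      decide_eq_true_eq] at h1
    omega
  · simp only [Bool.or_eq_true, Bool.and_eq_true, Bool.not_eq_true', decide_eq_false_iff_not,
      decide_eq_true_eq, not_or, not_and] at h1
    omega

lemma bestF_price_le (t : List (String × Int)) (b : String × Int) : (bestF t b).2 ≤ b.2 := by
  induction t generalizing b with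
  | nil => simp [bestF]
  | cons kv t' ih =>
      refine le_trans (ih (bstep b kv)) ?_
      rw [bstep_price]
      split_ifs with h <;> omega

lemma min2_cons_cons (x kv : String × Int) (t' : List (String × Int)) :
    PySem.List.min2? (x :: kv :: t') (fun kv => kv.2) (fun kv => PySem.Str.lower kv.1)
      = PySem.List.min2? (bstep x kv :: t') (fun kv => kv.2) (fun kv => PySem.Str.lower kv.1) := by
  unfold PySem.List.min2?
  rw [List.foldl_cons, List.foldl_cons, List.foldl_cons]
  congr 1
  show (if (decide (kv.2 < x.2) || !decide (x.2 < kv.2) && decide (PySem.Str.lower kv.1 < PySem.Str.lower x.1)) = true then some kv else some x) = some (bstep x kv)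
  unfold bstep
  exact (apply_ite some _ _ _).symm

lemma min2_cons_bestF (t : List (String × Int)) (b : String × Int) :
    PySem.List.min2? (b :: t) (fun kv => kv.2) (fun kv => PySem.Str.lower kv.1) = some (bestF t b) := by
  induction t generalizing b with
  | nil => rfl
  | cons kv t' ih =>
      rw [min2_cons_cons]
      exact ih (bstep b kv)

lemma pm_fold_eq_bestF_price (t : List (String × Int)) (b : String × Int) :
    t.foldl pmStep (some b.2) = some (bestF t b).2 := by
  induction t generalizing b with
  | nil => rfl
  | cons kv t' ih =>
      rw [List.foldl_cons]
      show t'.foldl pmStep (if kv.2 < b.2 then some kv.2 else some b.2) = some (bestF t' (bstep b kv)).2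
      have h := ih (bstep b kv)
      rw [bstep_price] at h
      split_ifs at h ⊢ with h1 <;> simpa using h

lemma art_step_key (kv b : String × Int) (m : Int) (hm : m ≤ (bstep b kv).2) :
    artStep (some m) (if b.2 = m then some b.1 else none) kv
      = (if (bstep b kv).2 = m then some (bstep b kv).1 else none) := by
  have hp := bstep_price b kv
  unfold artStep
  by_cases h1 : kv.2 < b.2
  · have hb1 : bstep b kv = kv := by
      unfold bstep; simp [h1]
    rw [hb1] at hm ⊢
    have hbm : ¬ b.2 = m := by omega
    by_cases hkm : kv.2 = m <;> simp [hkm, hbm]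
  · by_cases h2 : b.2 < kv.2
    · have hb1 : bstep b kv = b := by
        unfold bstep
        have : ¬ (decide (kv.2 < b.2) || !decide (b.2 < kv.2) && decide (PySem.Str.lower kv.1 < PySem.Str.lower b.1)) = true := by
          simp [h1, h2]
        exact if_neg this
      rw [hb1] at hm ⊢
      have hkm : ¬ kv.2 = m := by omega
      simp [hkm]
    · have hpe : kv.2 = b.2 := by omega
      have hb2 : (bstep b kv).2 = b.2 := by rw [hp]; simp [h1]
      by_cases hbm : b.2 = m
      · have hkm : kv.2 = m := by omega
        simp only [hbm, hkm, if_pos trivial]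
        unfold bstep
        simp only [h1, decide_false, Bool.false_or]
        have hnb : ¬ b.2 < kv.2 := by omega
        simp only [hnb, decide_false, Bool.not_false, Bool.true_and]
        by_cases hL : PySem.Str.lower kv.1 < PySem.Str.lower b.1 <;> simp [hL, hbm, hkm]
      · have hkm : ¬ kv.2 = m := by omega
        rw [hb2]
        simp [hkm, hbm]

lemma art_fold_eq_bestF_name (t : List (String × Int)) (b : String × Int) :
    t.foldl (artStep (some (bestF t b).2))
      (if b.2 = (bestF t b).2 then some b.1 else none) = some (bestF t b).1 := by
  induction t generalizing b with
  | nil => simp [bestF]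
  | cons kv t' ih =>
      show t'.foldl (artStep (some (bestF t' (bstep b kv)).2))
        (artStep (some (bestF t' (bstep b kv)).2) (if b.2 = (bestF t' (bstep b kv)).2 then some b.1 else none) kv)
        = some (bestF t' (bstep b kv)).1
      rw [art_step_key kv b _ (bestF_price_le t' (bstep b kv))]
      exact ih (bstep b kv)

lemma producto_cons (x : String × Int) (t : List (String × Int)) :
    producto_mas_barato (x :: t)
      = (if (bestF t x).2 ≤ 10000 then some (bestF t x).1 else none) := by
  have hpm : (x :: t).foldl pmStep none = some (bestF t x).2 := by
    rw [List.foldl_cons]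
    show t.foldl pmStep (some x.2) = _
    exact pm_fold_eq_bestF_price t x
  have hart : (x :: t).foldl (artStep (some (bestF t x).2)) none = some (bestF t x).1 := by
    rw [List.foldl_cons]
    have h0 : artStep (some (bestF t x).2) none x
        = (if x.2 = (bestF t x).2 then some x.1 else none) := by
      unfold artStep
      by_cases h : x.2 = (bestF t x).2 <;> simp [h]
    rw [h0]
    exact art_fold_eq_bestF_name t x
  simp only [producto_mas_barato, List.isEmpty_cons, Bool.false_eq_true, if_false, hpm]
  rw [hart]

lemma alt_cons (x : String × Int) (t : List (String × Int)) :
    producto_mas_barato_alt (x :: t)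
      = (if (bestF t x).2 ≤ 10000 then some (bestF t x).1 else none) := by
  simp only [producto_mas_barato_alt, min2_cons_bestF]

-- ===== VERDICT (by name: the statement is the Claim_ definition above) =====
theorem producto_mas_barato_spec : Claim_equal_producto_mas_barato := by
  intro catalogo _
  unfold Spec_producto_mas_barato
  cases catalogo with
  | nil => rfl
  | cons x t => rw [producto_cons, alt_cons]
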